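-- pv_equiv track=rewrite | github.com/at0m-b0mb/ethical-keylogger | keylogger.py | reconstruct_phrase
-- ===== SOURCE A (Python) =====
-- _NON_PRINTABLE = frozenset({
--     "[TAB]", "[ENTER]", "[CTRL]", "[SHIFT]", "[ALT]", "[CAPS]",
--     "[DEL]", "[HOME]", "[END]", "[PGUP]", "[PGDN]",
--     "[UP]", "[DOWN]", "[LEFT]", "[RIGHT]",
--     "[F1]", "[F2]", "[F3]", "[F4]", "[F5]", "[F6]",
--     "[F7]", "[F8]", "[F9]", "[F10]", "[F11]", "[F12]",
-- })
--
-- def reconstruct_phrase(raw: list[str]) -> str: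
--     """
--     Reconstruct typed text from a raw key sequence applying backspaces.
--
--     ``[BS]`` tokens delete the preceding visible character so the result
--     reflects what was actually typed rather than the raw key stream.
--     Excess backspaces (when the result buffer is already empty) are silently
--     ignored, matching normal editor behaviour.
--     """
--     result: list[str] = []
--     for token in raw:
--         if token == "[BS]":
--             if result:
--                 result.pop()
--         elif token not in _NON_PRINTABLE:
--             result.append(token)
--     return "".join(result).strip()
-- ===== SOURCE B (Python) =====
-- _NON_PRINTABLE = frozenset({
--     "[TAB]", "[ENTER]", "[CTRL]", "[SHIFT]", "[ALT]", "[CAPS]",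
--     "[DEL]", "[HOME]", "[END]", "[PGUP]", "[PGDN]",
--     "[UP]", "[DOWN]", "[LEFT]", "[RIGHT]",
--     "[F1]", "[F2]", "[F3]", "[F4]", "[F5]", "[F6]",
--     "[F7]", "[F8]", "[F9]", "[F10]", "[F11]", "[F12]",
-- })
--
-- def reconstruct_phrase(raw: list[str]) -> str:
--     """Single reverse pass with a pending-delete counter instead of a stack."""
--     skip = 0
--     buf: list[str] = []
--     for token in reversed(raw):
--         if token == "[BS]":
--             skip += 1
--         elif token in _NON_PRINTABLE:
--             pass
--         elif skip > 0:
--             skip -= 1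
--         else:
--             buf.append(token)
--     buf.reverse()
--     return "".join(buf).strip()
-- ===== Notes on version B (the rewrite author's own statement) =====
-- stated objective: alternative
-- what changed: Replaces the forward stack with push/pop by a single backward pass keeping only a pending-delete counter: a [BS] increments the counter and later (earlier-in-text) printable tokens are dropped while it is positive, so no element is ever removed from the buffer.
import Mathlib
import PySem

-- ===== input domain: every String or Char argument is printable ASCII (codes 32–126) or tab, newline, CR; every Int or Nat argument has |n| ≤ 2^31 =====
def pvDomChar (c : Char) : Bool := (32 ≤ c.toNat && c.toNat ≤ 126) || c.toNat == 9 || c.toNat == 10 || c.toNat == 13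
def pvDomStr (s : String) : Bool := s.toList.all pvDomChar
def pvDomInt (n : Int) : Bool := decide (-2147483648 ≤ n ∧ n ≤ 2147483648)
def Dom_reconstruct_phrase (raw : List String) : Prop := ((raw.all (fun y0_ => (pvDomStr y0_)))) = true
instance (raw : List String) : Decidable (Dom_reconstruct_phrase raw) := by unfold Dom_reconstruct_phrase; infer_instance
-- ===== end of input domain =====

-- B replaces A's forward stack (append/pop) by one backward pass with a pending-delete counter; same cost, different traversal.

-- ===== PORT A =====
def pvNonPrintable : List String := [
  "[TAB]", "[ENTER]", "[CTRL]", "[SHIFT]", "[ALT]", "[CAPS]",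
  "[DEL]", "[HOME]", "[END]", "[PGUP]", "[PGDN]",
  "[UP]", "[DOWN]", "[LEFT]", "[RIGHT]",
  "[F1]", "[F2]", "[F3]", "[F4]", "[F5]", "[F6]",
  "[F7]", "[F8]", "[F9]", "[F10]", "[F11]", "[F12]"]

-- loop body of A: '[BS]' pops the last element if the buffer is nonempty, non-printables are skipped, others append
def pvStepA (result : List String) (token : String) : List String :=
  if token = "[BS]" then (if result ≠ [] then result.dropLast else result)
  else if pvNonPrintable.contains token then result
  else result ++ [token]

def reconstruct_phrase (raw : List String) : String :=
  PySem.Str.strip (PySem.Str.join "" (raw.foldl pvStepA []))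

-- ===== PORT B =====
-- loop body of B over reversed(raw): state is (skip counter, buf)
def pvStepB (st : Nat × List String) (token : String) : Nat × List String :=
  if token = "[BS]" then (st.1 + 1, st.2)
  else if pvNonPrintable.contains token then st
  else if st.1 > 0 then (st.1 - 1, st.2)
  else (st.1, st.2 ++ [token])

def reconstruct_phrase_alt (raw : List String) : String :=
  PySem.Str.strip (PySem.Str.join "" ((raw.reverse.foldl pvStepB (0, [])).2.reverse))

-- ===== PRECONDITION & SPEC =====
def Spec_reconstruct_phrase (raw : List String) (out : String) : Prop := out = reconstruct_phrase_alt raw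
instance (raw : List String) (out : String) : Decidable (Spec_reconstruct_phrase raw out) := by unfold Spec_reconstruct_phrase; infer_instance

-- ===== CLAIM (what is proved, stated in full; the proofs are below) =====
def Claim_equal_reconstruct_phrase : Prop := ∀ (raw : List String), Dom_reconstruct_phrase raw → Spec_reconstruct_phrase raw (reconstruct_phrase raw)

-- ===== LEMMAS AND PROOFS =====

-- Invariant of B's backward pass: with `skip` deletions pending, the buffer collects
-- (in reverse order) A's stack with its last `skip` elements removed.
theorem pv_key (raw : List String) : ∀ (skip : Nat) (buf : List String),
    (raw.reverse.foldl pvStepB (skip, buf)).2 =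
      buf ++ ((raw.foldl pvStepA []).take ((raw.foldl pvStepA []).length - skip)).reverse := by
  induction raw using List.reverseRecOn with
  | nil => intro skip buf; simp
  | append_singleton l a ih =>
    intro skip buf
    have hA : (l ++ [a]).foldl pvStepA [] = pvStepA (l.foldl pvStepA []) a := by
      simp [List.foldl_append]
    have hrev : (l ++ [a]).reverse = a :: l.reverse := by simp
    set R := l.foldl pvStepA [] with hR
    rw [hrev, List.foldl_cons, hA]
    by_cases hbs : a = "[BS]"
    · -- backspace: skip+1 on the B side, dropLast on the A side
      simp only [pvStepB, pvStepA, hbs, if_pos trivial]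
      rw [ih (skip + 1) buf]
      have hdl : (if R ≠ [] then R.dropLast else R) = R.dropLast := by
        rcases R with _ | _ <;> simp
      rw [hdl, List.dropLast_eq_take, List.length_take, List.take_take]
      have hidx : R.length - (skip + 1) = min (min (R.length - 1) R.length - skip) (R.length - 1) := by omega
      rw [hidx]
    · by_cases hnp : pvNonPrintable.contains a
      · simp only [pvStepB, pvStepA, hbs, hnp, ite_true]
        exact ih skip buf
      · by_cases hsk : skip > 0
        · -- printable consumed by a pending backspace
          simp only [pvStepB, pvStepA, if_neg hbs, hnp, Bool.false_eq_true, if_false,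
            if_pos hsk]
          rw [ih (skip - 1) buf]
          have hle : R.length + 1 - skip ≤ R.length := by omega
          rw [List.length_append, List.length_singleton,
            List.take_append_of_le_length hle]
          congr 3
          omega
        · -- printable kept
          simp only [pvStepB, pvStepA, if_neg hbs, hnp, Bool.false_eq_true, if_false,
            if_neg hsk]
          have hsk0 : skip = 0 := by omega
          subst hsk0
          rw [ih 0 (buf ++ [a])]
          have htk : (R ++ [a]).take ((R ++ [a]).length - 0) = R ++ [a] := by simp
          rw [htk]
          simp

-- at skip = 0 the backward pass reproduces A's stack (reversed)
theorem pv_stacks (raw : List String) :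
    (raw.reverse.foldl pvStepB (0, [])).2.reverse = raw.foldl pvStepA [] := by
  rw [pv_key raw 0 []]
  simp

-- ===== VERDICT (by name: the statement is the Claim_ definition above) =====
theorem reconstruct_phrase_spec : Claim_equal_reconstruct_phrase := by
  intro raw _
  unfold Spec_reconstruct_phrase reconstruct_phrase reconstruct_phrase_alt
  rw [pv_stacks]
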